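-- pv_equiv track=rewrite | github.com/pypi-data/pypi-mirror-404 | packages/aiptx/aiptx-4.0.0-py3-none-any.whl/aipt_v2/stealth/obfuscation/bash_obfusc.py | variable_expand
-- ===== SOURCE A (Python) =====
-- def variable_expand(command: str) -> str:
--     """
--     Use variable expansion to hide strings.
--
--     Args:
--         command: Command to obfuscate
--
--     Returns:
--         Command with variable expansions
--     """
--     # Common substitutions using env vars
--     substitutions = [
--         ("bash", '${SHELL##*/}'),
--         ("/bin/sh", '${SHELL}'),
--         ("cat", 'c""at'),
--         ("wget", 'w""get'),
--         ("curl", 'cu""rl'),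
--     ]
--
--     result = command
--     for original, replacement in substitutions:
--         if original in result:
--             result = result.replace(original, replacement)
--
--     return result
-- ===== SOURCE B (Python) =====
-- def variable_expand(command: str) -> str:
--     """
--     Use variable expansion to hide strings.
--
--     One table-driven left-to-right scan: at each position the first matching
--     original is replaced, instead of five sequential whole-string passes.
--     """
--     table = [
--         ("bash", '${SHELL##*/}'),
--         ("/bin/sh", '${SHELL}'),
--         ("cat", 'c""at'),
--         ("wget", 'w""get'),
--         ("curl", 'cu""rl'),
--     ]
--     out = []
--     i = 0
--     n = len(command)
--     while i < n:
--         for original, replacement in table: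
--             if command.startswith(original, i):
--                 out.append(replacement)
--                 i += len(original)
--                 break
--         else:
--             out.append(command[i])
--             i += 1
--     return "".join(out)
-- ===== Notes on version B (the rewrite author's own statement) =====
-- stated objective: alternative
-- what changed: Replaces five sequential whole-string str.replace passes by a single left-to-right scan that at each position substitutes the first matching original from a table (valid because the patterns never overlap and no replacement reintroduces a pattern).
import Mathlib
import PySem

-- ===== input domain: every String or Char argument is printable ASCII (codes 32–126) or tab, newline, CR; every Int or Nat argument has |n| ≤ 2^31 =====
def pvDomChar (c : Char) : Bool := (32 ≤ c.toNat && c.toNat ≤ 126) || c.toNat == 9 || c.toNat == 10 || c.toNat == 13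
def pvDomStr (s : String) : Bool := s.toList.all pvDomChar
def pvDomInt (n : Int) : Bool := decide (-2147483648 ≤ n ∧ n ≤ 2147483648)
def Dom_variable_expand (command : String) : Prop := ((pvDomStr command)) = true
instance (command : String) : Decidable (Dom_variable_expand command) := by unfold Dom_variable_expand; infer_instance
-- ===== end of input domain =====

-- B replaces A's five sequential whole-string replace passes by one table-driven
-- left-to-right scan (alternative decomposition, same observable result).

-- ===== PORT A =====
-- literal transliteration of A: a list of substitutions, folded left with
-- "if original in result: result = result.replace(original, replacement)"
def variable_expand (command : String) : String :=
  let substitutions : List (String × String) :=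
    [("bash", "${SHELL##*/}"), ("/bin/sh", "${SHELL}"), ("cat", "c\"\"at"),
     ("wget", "w\"\"get"), ("curl", "cu\"\"rl")]
  substitutions.foldl
    (fun result p =>
      if PySem.Str.isIn p.1 result = true then PySem.Str.replace result p.1 p.2 else result)
    command

-- ===== PORT B =====
-- Source B's single scan: at each position try the table entries in order
-- (str.startswith ≙ List.isPrefixOf); on a match emit the replacement and skip
-- the original, else emit the character; the collected pieces are joined at the end.
def vexScan : List Char → List Char
  | [] => []
  | c :: t =>
    if List.isPrefixOf ['b','a','s','h'] (c :: t) then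
      "${SHELL##*/}".toList ++ vexScan (t.drop 3)
    else if List.isPrefixOf ['/','b','i','n','/','s','h'] (c :: t) then
      "${SHELL}".toList ++ vexScan (t.drop 6)
    else if List.isPrefixOf ['c','a','t'] (c :: t) then
      "c\"\"at".toList ++ vexScan (t.drop 2)
    else if List.isPrefixOf ['w','g','e','t'] (c :: t) then
      "w\"\"get".toList ++ vexScan (t.drop 3)
    else if List.isPrefixOf ['c','u','r','l'] (c :: t) then
      "cu\"\"rl".toList ++ vexScan (t.drop 3)
    else c :: vexScan t
termination_by l => l.length
decreasing_by all_goals (simp only [List.length_drop, List.length_cons]; omega)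

def variable_expand_alt (command : String) : String :=
  String.ofList (vexScan command.toList)

-- ===== PRECONDITION & SPEC =====
def Spec_variable_expand (command : String) (out : String) : Prop := out = variable_expand_alt command
instance (command : String) (out : String) : Decidable (Spec_variable_expand command out) := by unfold Spec_variable_expand; infer_instance

-- ===== CLAIM (what is proved, stated in full; the proofs are below) =====
def Claim_equal_variable_expand : Prop := ∀ (command : String), Dom_variable_expand command → Spec_variable_expand command (variable_expand command)

-- ===== LEMMAS AND PROOFS =====

-- shorthand for the five patterns/replacements (proof-side only)
def vP1 : List Char := ['b','a','s','h']
def vR1 : List Char := "${SHELL##*/}".toList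
def vP2 : List Char := ['/','b','i','n','/','s','h']
def vR2 : List Char := "${SHELL}".toList
def vP3 : List Char := ['c','a','t']
def vR3 : List Char := "c\"\"at".toList
def vP4 : List Char := ['w','g','e','t']
def vR4 : List Char := "w\"\"get".toList
def vP5 : List Char := ['c','u','r','l']
def vR5 : List Char := "cu\"\"rl".toList

-- ---- interface lemmas for PySem.Chars.replace ----

theorem vex_go_acc (old new : List Char) (fuel : Nat) :
    ∀ (l acc : List Char),
      PySem.Chars.replace.go old new fuel l acc
        = acc.reverse ++ PySem.Chars.replace.go old new fuel l [] := by
  induction fuel with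
  | zero => intro l acc; simp [PySem.Chars.replace.go]
  | succ f ih =>
    intro l acc
    cases l with
    | nil => simp [PySem.Chars.replace.go]
    | cons c t =>
      simp only [PySem.Chars.replace.go]
      split
      · rw [ih _ (new.reverse ++ acc), ih _ (new.reverse ++ [])]
        simp
      · rw [ih _ (c :: acc), ih _ (c :: [])]
        simp

theorem vex_go_fuel (old new : List Char) (hold : old ≠ []) :
    ∀ (n : Nat) (l : List Char) (fuel fuel' : Nat),
      l.length ≤ n → l.length ≤ fuel → l.length ≤ fuel' →
      PySem.Chars.replace.go old new fuel l [] = PySem.Chars.replace.go old new fuel' l [] := by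
  intro n
  induction n with
  | zero =>
    intro l fuel fuel' hn _ _
    have : l = [] := List.length_eq_zero_iff.mp (Nat.le_zero.mp hn)
    subst this
    cases fuel <;> cases fuel' <;> simp [PySem.Chars.replace.go]
  | succ n ih =>
    intro l fuel fuel' hn hf hf'
    cases l with
    | nil => cases fuel <;> cases fuel' <;> simp [PySem.Chars.replace.go]
    | cons c t =>
      have hlen : (c :: t).length = t.length + 1 := by simp
      cases fuel with
      | zero => simp at hf
      | succ f =>
        cases fuel' with
        | zero => simp at hf'
        | succ f' =>
          simp only [PySem.Chars.replace.go]
          split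
          · rename_i hpre
            have hd : (List.drop old.length (c :: t)).length ≤ t.length := by
              have : 1 ≤ old.length := by
                cases old with
                | nil => exact absurd rfl hold
                | cons _ _ => simp
              simp only [List.length_drop]
              omega
            rw [vex_go_acc, vex_go_acc old new f']
            congr 1
            exact ih _ f f' (by simp at hn; omega) (by simp at hf; omega) (by simp at hf'; omega)
          · rw [vex_go_acc, vex_go_acc old new f']
            congr 1
            exact ih t f f' (by simp at hn; omega) (by simp at hf; omega) (by simp at hf'; omega)

theorem vex_replace_nil (old new : List Char) (hold : old ≠ []) :
    PySem.Chars.replace [] old new = [] := by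
  simp [PySem.Chars.replace, PySem.Chars.replace.go, List.isEmpty_iff, hold]

theorem vex_replace_cons_neg (old new : List Char) (c : Char) (t : List Char)
    (h : ¬ List.isPrefixOf old (c :: t) = true) :
    PySem.Chars.replace (c :: t) old new = c :: PySem.Chars.replace t old new := by
  have hold : ¬ old.isEmpty = true := by
    intro he
    exact h (by simp [List.isEmpty_iff.mp he])
  simp only [PySem.Chars.replace, hold]
  simp only [List.length_cons, PySem.Chars.replace.go, h]
  rw [vex_go_acc old new t.length t [c]]
  simp

theorem vex_replace_append_pos (old new u : List Char) (hold : old ≠ []) :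
    PySem.Chars.replace (old ++ u) old new = new ++ PySem.Chars.replace u old new := by
  cases old with
  | nil => exact absurd rfl hold
  | cons o os =>
    have hpre : List.isPrefixOf (o :: os) (o :: (os ++ u)) = true := by
      have : o :: (os ++ u) = (o :: os) ++ u := rfl
      rw [this]
      exact List.isPrefixOf_iff_prefix.mpr (List.prefix_append _ u)
    have hdrop : List.drop (o :: os).length (o :: (os ++ u)) = u := by
      have : o :: (os ++ u) = (o :: os) ++ u := rfl
      rw [this]
      exact List.drop_left
    have h1 : (o :: os) ++ u = o :: (os ++ u) := rfl
    rw [h1]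
    simp only [PySem.Chars.replace, List.isEmpty_cons, if_false, Bool.false_eq_true,
      List.length_cons]
    simp only [PySem.Chars.replace.go, hpre, if_true, hdrop]
    rw [vex_go_acc (o :: os) new (os ++ u).length u (new.reverse ++ [])]
    simp only [List.append_nil, List.reverse_reverse]
    congr 1
    exact vex_go_fuel (o :: os) new (by simp) u.length u (os ++ u).length u.length (le_refl _)
      (by simp) (le_refl _)

theorem vex_replace_not_infix (old new : List Char) (hold : old ≠ []) :
    ∀ (s : List Char), ¬ old <:+: s → PySem.Chars.replace s old new = s := by
  intro s
  induction s with
  | nil => intro _; exact vex_replace_nil old new hold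
  | cons c t ih =>
    intro h
    have h1 : ¬ List.isPrefixOf old (c :: t) = true := by
      intro hp
      exact h (List.IsPrefix.isInfix (List.isPrefixOf_iff_prefix.mp hp))
    rw [vex_replace_cons_neg old new c t h1, ih (fun hi => h (List.infix_cons hi))]

-- a mismatch inside the known part D refutes "P is a prefix of D ++ v" for every v
theorem vex_not_prefix_append (P D : List Char)
    (h : P.take D.length ≠ D.take P.length) :
    ∀ (v : List Char), ¬ P <+: (D ++ v) := by
  intro v hp
  have he : P = (D ++ v).take P.length := List.prefix_iff_eq_take.mp hp
  rw [List.take_append] at he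
  apply h
  by_cases hle : P.length ≤ D.length
  · have h2 : P.length - D.length = 0 := by omega
    rw [h2] at he
    simp at he
    rw [he]
    simp [List.take_take, List.length_take, Nat.min_comm]
  · have hDP : D.take P.length = D := List.take_of_length_le (by omega)
    rw [hDP]
    have : P.take D.length = ((D.take P.length) ++ v.take (P.length - D.length)).take D.length := by
      rw [← he]
    rw [this, hDP, List.take_append]
    simp

-- step over a concrete block C that pattern P can never match inside
theorem vex_skip (P R : List Char) :
    ∀ (C : List Char),
      (∀ k, k < C.length → (P.take (C.drop k).length ≠ (C.drop k).take P.length)) →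
      ∀ (v : List Char), PySem.Chars.replace (C ++ v) P R = C ++ PySem.Chars.replace v P R := by
  intro C
  induction C with
  | nil => intro _ v; simp
  | cons c D ih =>
    intro h v
    have h0 := h 0 (by simp)
    simp only [List.drop_zero] at h0
    have hnp : ¬ List.isPrefixOf P (c :: (D ++ v)) = true := by
      intro hp
      exact vex_not_prefix_append P (c :: D) h0 v
        (by simpa using List.isPrefixOf_iff_prefix.mp hp)
    have : (c :: D) ++ v = c :: (D ++ v) := by simp
    rw [this, vex_replace_cons_neg P R c (D ++ v) hnp,
        ih (fun k hk => h (k + 1) (by simp; omega)) v]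
    simp

-- a probe q from a blocked, suffix-closed family found in replace's output was
-- already in its input
theorem vex_reflect (P R : List Char) (hP : P ≠ []) (Q : List Char → Prop)
    (hQne : ∀ q, Q q → q ≠ [])
    (hQsuf : ∀ q₀ q', Q (q₀ :: q') → q' ≠ [] → Q q')
    (hQR : ∀ q, Q q → ∀ v, ¬ q <+: (R ++ v)) :
    ∀ (n : Nat) (s : List Char), s.length ≤ n →
      ∀ q, Q q → q <+: PySem.Chars.replace s P R → q <+: s := by
  intro n
  induction n with
  | zero =>
    intro s hn q hQ hq
    have : s = [] := List.length_eq_zero_iff.mp (Nat.le_zero.mp hn)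
    subst this
    rw [vex_replace_nil P R hP] at hq
    exact absurd (List.prefix_nil.mp hq) (hQne q hQ)
  | succ n ih =>
    intro s hn q hQ hq
    cases s with
    | nil =>
      rw [vex_replace_nil P R hP] at hq
      exact absurd (List.prefix_nil.mp hq) (hQne q hQ)
    | cons c t =>
      by_cases hp : List.isPrefixOf P (c :: t) = true
      · -- the pass substitutes here: the output starts with R, which blocks q
        obtain ⟨u, hu⟩ := List.isPrefixOf_iff_prefix.mp hp
        rw [← hu, vex_replace_append_pos P R u hP] at hq
        exact absurd hq (hQR q hQ _)
      · rw [vex_replace_cons_neg P R c t hp] at hq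
        cases q with
        | nil => exact absurd rfl (hQne _ hQ)
        | cons q₀ q' =>
          obtain ⟨hq0, hq'⟩ := List.cons_prefix_cons.mp hq
          subst hq0
          cases hq'e : q' with
          | nil => simp
          | cons a b =>
            rw [← hq'e]
            have : q' <+: t := by
              apply ih t (by simp at hn; omega) q' (hQsuf q₀ q' hQ (by simp [hq'e]))
              exact hq'
            exact List.cons_prefix_cons.mpr ⟨rfl, this⟩

-- a nonempty suffix q of the pattern Pj is blocked by the block R: it is never
-- a prefix of R ++ v
theorem vex_blocked (Pj R : List Char)
    (h : ∀ k, k < Pj.length → ((Pj.drop k).take R.length ≠ R.take (Pj.drop k).length)) :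
    ∀ q, (q ≠ [] ∧ q <:+ Pj) → ∀ v, ¬ q <+: (R ++ v) := by
  rintro q ⟨hne, w, hw⟩ v
  have hk : w.length < Pj.length := by
    have := congrArg List.length hw
    simp at this
    cases q with
    | nil => exact absurd rfl hne
    | cons a b => simp at this ⊢; omega
  have hdrop : Pj.drop w.length = q := by rw [← hw]; exact List.drop_left
  exact vex_not_prefix_append q R (by rw [← hdrop]; exact h _ hk) v

theorem vex_pass_reflect (P R Pj : List Char) (hP : P ≠ [])
    (hblock : ∀ k, k < Pj.length → ((Pj.drop k).take R.length ≠ R.take (Pj.drop k).length)) :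
    ∀ (s q : List Char), q ≠ [] → q <:+ Pj → q <+: PySem.Chars.replace s P R → q <+: s := by
  intro s q hne hsuf hq
  refine vex_reflect P R hP (fun q' => q' ≠ [] ∧ q' <:+ Pj) (fun _ h => h.1)
    (fun q₀ q' hQ hne' => ⟨hne', List.IsSuffix.trans (List.suffix_cons q₀ q') hQ.2⟩)
    (vex_blocked Pj R hblock) s.length s (le_refl _) q ⟨hne, hsuf⟩ hq

-- if pattern j does not match at the head of c :: t, it still does not match
-- there after the earlier passes have rewritten t
theorem vexK2 (c : Char) (t : List Char)
    (h : ¬ List.isPrefixOf vP2 (c :: t) = true) :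
    ¬ List.isPrefixOf vP2 (c :: PySem.Chars.replace t vP1 vR1) = true := by
  intro hcon
  obtain ⟨hc, hq⟩ := List.cons_prefix_cons.mp (List.isPrefixOf_iff_prefix.mp hcon)
  have h1 : (['b','i','n','/','s','h'] : List Char) <+: t :=
    vex_pass_reflect vP1 vR1 vP2 (by decide) (by decide) t _ (by decide) (by decide) hq
  exact h (List.isPrefixOf_iff_prefix.mpr (List.cons_prefix_cons.mpr ⟨hc, h1⟩))

theorem vexK3 (c : Char) (t : List Char)
    (h : ¬ List.isPrefixOf vP3 (c :: t) = true) :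
    ¬ List.isPrefixOf vP3
      (c :: PySem.Chars.replace (PySem.Chars.replace t vP1 vR1) vP2 vR2) = true := by
  intro hcon
  obtain ⟨hc, hq⟩ := List.cons_prefix_cons.mp (List.isPrefixOf_iff_prefix.mp hcon)
  have h2 : (['a','t'] : List Char) <+: PySem.Chars.replace t vP1 vR1 :=
    vex_pass_reflect vP2 vR2 vP3 (by decide) (by decide) _ _ (by decide) (by decide) hq
  have h1 : (['a','t'] : List Char) <+: t :=
    vex_pass_reflect vP1 vR1 vP3 (by decide) (by decide) t _ (by decide) (by decide) h2
  exact h (List.isPrefixOf_iff_prefix.mpr (List.cons_prefix_cons.mpr ⟨hc, h1⟩))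

theorem vexK4 (c : Char) (t : List Char)
    (h : ¬ List.isPrefixOf vP4 (c :: t) = true) :
    ¬ List.isPrefixOf vP4
      (c :: PySem.Chars.replace (PySem.Chars.replace (PySem.Chars.replace t vP1 vR1) vP2 vR2)
        vP3 vR3) = true := by
  intro hcon
  obtain ⟨hc, hq⟩ := List.cons_prefix_cons.mp (List.isPrefixOf_iff_prefix.mp hcon)
  have h3 : (['g','e','t'] : List Char) <+:
      PySem.Chars.replace (PySem.Chars.replace t vP1 vR1) vP2 vR2 :=
    vex_pass_reflect vP3 vR3 vP4 (by decide) (by decide) _ _ (by decide) (by decide) hq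
  have h2 : (['g','e','t'] : List Char) <+: PySem.Chars.replace t vP1 vR1 :=
    vex_pass_reflect vP2 vR2 vP4 (by decide) (by decide) _ _ (by decide) (by decide) h3
  have h1 : (['g','e','t'] : List Char) <+: t :=
    vex_pass_reflect vP1 vR1 vP4 (by decide) (by decide) t _ (by decide) (by decide) h2
  exact h (List.isPrefixOf_iff_prefix.mpr (List.cons_prefix_cons.mpr ⟨hc, h1⟩))

theorem vexK5 (c : Char) (t : List Char)
    (h : ¬ List.isPrefixOf vP5 (c :: t) = true) :
    ¬ List.isPrefixOf vP5
      (c :: PySem.Chars.replace (PySem.Chars.replace (PySem.Chars.replace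
        (PySem.Chars.replace t vP1 vR1) vP2 vR2) vP3 vR3) vP4 vR4) = true := by
  intro hcon
  obtain ⟨hc, hq⟩ := List.cons_prefix_cons.mp (List.isPrefixOf_iff_prefix.mp hcon)
  have h4 : (['u','r','l'] : List Char) <+:
      PySem.Chars.replace (PySem.Chars.replace (PySem.Chars.replace t vP1 vR1) vP2 vR2) vP3 vR3 :=
    vex_pass_reflect vP4 vR4 vP5 (by decide) (by decide) _ _ (by decide) (by decide) hq
  have h3 : (['u','r','l'] : List Char) <+:
      PySem.Chars.replace (PySem.Chars.replace t vP1 vR1) vP2 vR2 :=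
    vex_pass_reflect vP3 vR3 vP5 (by decide) (by decide) _ _ (by decide) (by decide) h4
  have h2 : (['u','r','l'] : List Char) <+: PySem.Chars.replace t vP1 vR1 :=
    vex_pass_reflect vP2 vR2 vP5 (by decide) (by decide) _ _ (by decide) (by decide) h3
  have h1 : (['u','r','l'] : List Char) <+: t :=
    vex_pass_reflect vP1 vR1 vP5 (by decide) (by decide) t _ (by decide) (by decide) h2
  exact h (List.isPrefixOf_iff_prefix.mpr (List.cons_prefix_cons.mpr ⟨hc, h1⟩))

-- the five sequential passes equal the single scan
theorem vex_main : ∀ (n : Nat) (s : List Char), s.length ≤ n →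
    PySem.Chars.replace (PySem.Chars.replace (PySem.Chars.replace (PySem.Chars.replace
      (PySem.Chars.replace s vP1 vR1) vP2 vR2) vP3 vR3) vP4 vR4) vP5 vR5 = vexScan s := by
  intro n
  induction n with
  | zero =>
    intro s hn
    have : s = [] := List.length_eq_zero_iff.mp (Nat.le_zero.mp hn)
    subst this
    rw [vex_replace_nil _ _ (by decide), vex_replace_nil _ _ (by decide),
        vex_replace_nil _ _ (by decide), vex_replace_nil _ _ (by decide),
        vex_replace_nil _ _ (by decide)]
    simp [vexScan]
  | succ n ih =>
    intro s hn
    cases s with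
    | nil =>
      rw [vex_replace_nil _ _ (by decide), vex_replace_nil _ _ (by decide),
          vex_replace_nil _ _ (by decide), vex_replace_nil _ _ (by decide),
          vex_replace_nil _ _ (by decide)]
      simp [vexScan]
    | cons c t =>
      by_cases h1 : List.isPrefixOf vP1 (c :: t) = true
      · obtain ⟨u, hu⟩ := List.isPrefixOf_iff_prefix.mp h1
        have hulen : u.length ≤ n := by
          have := congrArg List.length hu
          simp [vP1] at this
          simp at hn
          omega
        rw [← hu,
            vex_replace_append_pos vP1 vR1 u (by decide),
            vex_skip vP2 vR2 vR1 (by decide),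
            vex_skip vP3 vR3 vR1 (by decide),
            vex_skip vP4 vR4 vR1 (by decide),
            vex_skip vP5 vR5 vR1 (by decide),
            ih u hulen]
        show vR1 ++ vexScan u = vexScan (('b' : Char) :: 'a' :: 's' :: 'h' :: u)
        rw [vexScan]
        simp [List.isPrefixOf, vR1]
      · by_cases h2 : List.isPrefixOf vP2 (c :: t) = true
        · obtain ⟨u, hu⟩ := List.isPrefixOf_iff_prefix.mp h2
          have hulen : u.length ≤ n := by
            have := congrArg List.length hu
            simp [vP2] at this
            simp at hn
            omega
          rw [← hu,
              vex_skip vP1 vR1 vP2 (by decide),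
              vex_replace_append_pos vP2 vR2 _ (by decide),
              vex_skip vP3 vR3 vR2 (by decide),
              vex_skip vP4 vR4 vR2 (by decide),
              vex_skip vP5 vR5 vR2 (by decide),
              ih u hulen]
          show vR2 ++ vexScan u
            = vexScan (('/' : Char) :: 'b' :: 'i' :: 'n' :: '/' :: 's' :: 'h' :: u)
          rw [vexScan]
          simp [List.isPrefixOf, vR2]
        · by_cases h3 : List.isPrefixOf vP3 (c :: t) = true
          · obtain ⟨u, hu⟩ := List.isPrefixOf_iff_prefix.mp h3
            have hulen : u.length ≤ n := by
              have := congrArg List.length hu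
              simp [vP3] at this
              simp at hn
              omega
            rw [← hu,
                vex_skip vP1 vR1 vP3 (by decide),
                vex_skip vP2 vR2 vP3 (by decide),
                vex_replace_append_pos vP3 vR3 _ (by decide),
                vex_skip vP4 vR4 vR3 (by decide),
                vex_skip vP5 vR5 vR3 (by decide),
                ih u hulen]
            show vR3 ++ vexScan u = vexScan (('c' : Char) :: 'a' :: 't' :: u)
            rw [vexScan]
            simp [List.isPrefixOf, vR3]
          · by_cases h4 : List.isPrefixOf vP4 (c :: t) = true
            · obtain ⟨u, hu⟩ := List.isPrefixOf_iff_prefix.mp h4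
              have hulen : u.length ≤ n := by
                have := congrArg List.length hu
                simp [vP4] at this
                simp at hn
                omega
              rw [← hu,
                  vex_skip vP1 vR1 vP4 (by decide),
                  vex_skip vP2 vR2 vP4 (by decide),
                  vex_skip vP3 vR3 vP4 (by decide),
                  vex_replace_append_pos vP4 vR4 _ (by decide),
                  vex_skip vP5 vR5 vR4 (by decide),
                  ih u hulen]
              show vR4 ++ vexScan u = vexScan (('w' : Char) :: 'g' :: 'e' :: 't' :: u)
              rw [vexScan]
              simp [List.isPrefixOf, vR4]
            · by_cases h5 : List.isPrefixOf vP5 (c :: t) = true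
              · obtain ⟨u, hu⟩ := List.isPrefixOf_iff_prefix.mp h5
                have hulen : u.length ≤ n := by
                  have := congrArg List.length hu
                  simp [vP5] at this
                  simp at hn
                  omega
                rw [← hu,
                    vex_skip vP1 vR1 vP5 (by decide),
                    vex_skip vP2 vR2 vP5 (by decide),
                    vex_skip vP3 vR3 vP5 (by decide),
                    vex_skip vP4 vR4 vP5 (by decide),
                    vex_replace_append_pos vP5 vR5 _ (by decide),
                    ih u hulen]
                show vR5 ++ vexScan u = vexScan (('c' : Char) :: 'u' :: 'r' :: 'l' :: u)
                rw [vexScan]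
                simp [List.isPrefixOf, vR5]
              · rw [vex_replace_cons_neg vP1 vR1 c t h1,
                    vex_replace_cons_neg vP2 vR2 c _ (vexK2 c t h2),
                    vex_replace_cons_neg vP3 vR3 c _ (vexK3 c t h3),
                    vex_replace_cons_neg vP4 vR4 c _ (vexK4 c t h4),
                    vex_replace_cons_neg vP5 vR5 c _ (vexK5 c t h5),
                    ih t (by simp at hn; omega)]
                rw [vexScan]
                rw [if_neg (by simpa [vP1] using h1), if_neg (by simpa [vP2] using h2),
                    if_neg (by simpa [vP3] using h3), if_neg (by simpa [vP4] using h4),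
                    if_neg (by simpa [vP5] using h5)]

-- one guarded A-step on strings is one unconditional Chars.replace on char lists
theorem vex_step_toList (s o n : String) (ho : o.toList ≠ []) :
    (if PySem.Str.isIn o s = true then PySem.Str.replace s o n else s).toList
      = PySem.Chars.replace s.toList o.toList n.toList := by
  by_cases h : PySem.Str.isIn o s = true
  · rw [if_pos h, PySem.Str.toList_replace]
  · rw [if_neg h]
    have hfalse : PySem.Chars.isIn o.toList s.toList = false := by
      rw [← PySem.Str.isIn_eq]
      exact Bool.not_eq_true _ |>.mp h
    exact (vex_replace_not_infix _ _ ho s.toList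
      ((PySem.Chars.isIn_eq_false_iff _ _).mp hfalse)).symm

-- ===== VERDICT (by name: the statement is the Claim_ definition above) =====
theorem variable_expand_spec : Claim_equal_variable_expand := by
  unfold Claim_equal_variable_expand Spec_variable_expand
  intro command _
  have hA : (variable_expand command).toList
      = PySem.Chars.replace (PySem.Chars.replace (PySem.Chars.replace (PySem.Chars.replace
          (PySem.Chars.replace command.toList vP1 vR1) vP2 vR2) vP3 vR3) vP4 vR4) vP5 vR5 := by
    simp only [variable_expand, List.foldl]
    rw [vex_step_toList _ _ _ (by decide), vex_step_toList _ _ _ (by decide),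
        vex_step_toList _ _ _ (by decide), vex_step_toList _ _ _ (by decide),
        vex_step_toList _ _ _ (by decide)]
    rfl
  calc variable_expand command
      = String.ofList ((variable_expand command).toList) := (String.ofList_toList).symm
    _ = String.ofList (vexScan command.toList) := by
          rw [hA, vex_main command.toList.length command.toList (le_refl _)]
    _ = variable_expand_alt command := rfl
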